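-- pv_equiv track=rewrite | github.com/C0MPU73R/CIS1501-Fall2020 | MidtermReview/main.py | difference_of_primes_and_non_primes_through_n
-- ===== SOURCE A (Python) =====
-- import math
--
-- def is_prime(n):
--     if n == 2:
--         return True
--     if n % 2 == 0 or n <= 1:
--         return False
--
--     sqr = int(math.sqrt(n)) + 1
--
--     for divisor in range(3, sqr, 2):
--         if n % divisor == 0:
--             return False
--     return True
--
-- def difference_of_primes_and_non_primes_through_n( number ):
--     sum = 0
--     for n in range(1, number+1):
--         if is_prime(n):
--             sum += n
--         else:
--             sum -= n
--     return sum
-- ===== SOURCE B (Python) =====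
-- import math
--
-- def difference_of_primes_and_non_primes_through_n(number):
--     # Sieve of Eratosthenes, then 2*(sum of primes) - (sum of 1..number).
--     if number < 1:
--         return 0
--     total = number * (number + 1) // 2
--     sieve = [False, False] + [True] * (number - 1)  # indices 0..number
--     for p in range(2, math.isqrt(number) + 1):
--         if sieve[p]:
--             for m in range(p * p, number + 1, p):
--                 sieve[m] = False
--     prime_sum = sum(i for i in range(2, number + 1) if sieve[i])
--     return 2 * prime_sum - total
-- ===== Notes on version B (the rewrite author's own statement) =====
-- stated objective: faster
-- what changed: Replaced per-number trial division (is_prime for every n) with a single Sieve of Eratosthenes plus the closed form sum(1..n)=n(n+1)//2, returning 2*sum_of_primes - n(n+1)//2.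
import Mathlib
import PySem

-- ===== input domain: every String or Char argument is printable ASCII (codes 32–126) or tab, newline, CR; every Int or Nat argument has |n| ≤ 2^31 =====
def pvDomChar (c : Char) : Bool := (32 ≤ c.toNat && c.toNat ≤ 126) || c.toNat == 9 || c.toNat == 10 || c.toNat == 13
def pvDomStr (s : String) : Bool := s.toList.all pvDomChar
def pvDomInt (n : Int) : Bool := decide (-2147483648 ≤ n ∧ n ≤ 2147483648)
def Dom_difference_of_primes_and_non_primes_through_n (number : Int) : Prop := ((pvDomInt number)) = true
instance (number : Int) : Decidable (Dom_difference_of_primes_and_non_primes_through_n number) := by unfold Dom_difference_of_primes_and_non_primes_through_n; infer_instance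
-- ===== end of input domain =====

-- B replaces A's per-number trial division by a Sieve of Eratosthenes plus the closed form
-- sum(1..n) = n(n+1)//2 (objective: faster, asymptotically fewer divisions).

-- ===== PORT A =====
-- is_prime(n): trial division by odd divisors in range(3, int(math.sqrt(n))+1, 2).
-- int(math.sqrt(n)) is ported as Nat.sqrt, exact for 0 ≤ n ≤ 2^31 (doubles are exact there);
-- the for-loop with its early `return False` is the `.all` fold over the same range.
def pvIsPrime (n : Int) : Bool :=
  if n == 2 then true
  else if PySem.Int.mod n 2 == 0 || decide (n ≤ 1) then false
  else
    (PySem.List.pyRange 3 ((Nat.sqrt n.toNat : Int) + 1) 2).all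
      (fun d => !(PySem.Int.mod n d == 0))

def difference_of_primes_and_non_primes_through_n (number : Int) : Int :=
  (PySem.List.pyRange 1 (number + 1) 1).foldl
    (fun sum n => if pvIsPrime n then sum + n else sum - n) 0

-- ===== PORT B =====
-- inner loop: for m in range(p*p, number+1, p): sieve[m] = False   (indices are provably ≥ 0 and in range)
def pvMark (number : Int) (sieve : List Bool) (p : Int) : List Bool :=
  (PySem.List.pyRange (p * p) (number + 1) p).foldl
    (fun s m => s.set m.toNat false) sieve

-- outer body: if sieve[p]: mark multiples of p   (p is in range, so getD's default is never read)
def pvSieveStep (number : Int) (sieve : List Bool) (p : Int) : List Bool :=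
  if sieve.getD p.toNat false then pvMark number sieve p else sieve

-- sieve = [False, False] + [True]*(number-1); for p in range(2, math.isqrt(number)+1): …
def pvSieve (number : Int) : List Bool :=
  (PySem.List.pyRange 2 ((Nat.sqrt number.toNat : Int) + 1) 1).foldl
    (pvSieveStep number) ([false, false] ++ List.replicate (number - 1).toNat true)

def difference_of_primes_and_non_primes_through_n_alt (number : Int) : Int :=
  if number < 1 then 0
  else
    let total := PySem.Int.floordiv (number * (number + 1)) 2
    let sieve := pvSieve number
    let primeSum := ((PySem.List.pyRange 2 (number + 1) 1).filter
        (fun i => sieve.getD i.toNat false)).sum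
    2 * primeSum - total

-- ===== PRECONDITION & SPEC =====
def Spec_difference_of_primes_and_non_primes_through_n (number : Int) (out : Int) : Prop := out = difference_of_primes_and_non_primes_through_n_alt number
instance (number : Int) (out : Int) : Decidable (Spec_difference_of_primes_and_non_primes_through_n number out) := by unfold Spec_difference_of_primes_and_non_primes_through_n; infer_instance

-- ===== CLAIM (what is proved, stated in full; the proofs are below) =====
def Claim_equal_difference_of_primes_and_non_primes_through_n : Prop := ∀ (number : Int), Dom_difference_of_primes_and_non_primes_through_n number → Spec_difference_of_primes_and_non_primes_through_n number (difference_of_primes_and_non_primes_through_n number)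


-- ===== LEMMAS AND PROOFS =====

-- "i is ≥ 2 and survives sieving by all primes ≤ P"
def pvGood (P i : Nat) : Prop := 2 ≤ i ∧ ∀ q, Nat.Prime q → q ≤ P → q ∣ i → ¬ q * q ≤ i

-- setting entries of a Bool list to false along a list of nonnegative indices
theorem pv_foldl_set_false (L : List Int) (hL : ∀ m ∈ L, 0 ≤ m) (s : List Bool) (i : Nat) :
    (L.foldl (fun s m => s.set m.toNat false) s).getD i false
      = if (i : Int) ∈ L then false else s.getD i false := by
  induction L generalizing s with
  | nil => simp
  | cons m t ih =>
    have hm : 0 ≤ m := hL m (by simp)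
    have ht : ∀ x ∈ t, 0 ≤ x := fun x hx => hL x (List.mem_cons_of_mem _ hx)
    rw [List.foldl_cons, ih ht]
    by_cases hit : (i : Int) ∈ t
    · simp [hit]
    · by_cases heq : (i : Int) = m
      · rw [show m.toNat = i from by omega]
        simp only [heq, List.mem_cons, true_or, if_true,
          List.getD_eq_getElem?_getD, List.getElem?_set]
        by_cases hlen : i < s.length <;> simp [hlen]
      · have hne : m.toNat ≠ i := by omega
        simp [hit, heq, List.getD_eq_getElem?_getD, hne]

-- initial sieve contents
theorem pv_s0_getD (number : Int) (h1 : 1 ≤ number) (i : Nat) (hi : (i : Int) ≤ number) :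
    (([false, false] ++ List.replicate (number - 1).toNat true).getD i false)
      = decide (2 ≤ i) := by
  match i with
  | 0 => simp
  | 1 => simp
  | (j+2) =>
    have hj : j < number.toNat - 1 := by omega
    simp [List.getD_eq_getElem?_getD, hj]

-- sieve loop invariant: after the outer loop has processed p = 2 .. P, entry i is still
-- True exactly when i ≥ 2 and no prime q ≤ P with q*q ≤ i divides i
theorem pv_sieve_inv (number : Int) (h1 : 1 ≤ number) :
    ∀ P : Nat, 1 ≤ P → (P : Int) ≤ number →
    ∀ i : Nat, (i : Int) ≤ number →
      (((PySem.List.pyRange 2 ((P : Int) + 1) 1).foldl (pvSieveStep number)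
          ([false, false] ++ List.replicate (number - 1).toNat true)).getD i false = true
        ↔ pvGood P i) := by
  intro P
  induction P with
  | zero => intro h0; exact absurd h0 (by omega)
  | succ P ih =>
    intro _ hPn i hi
    by_cases hP0 : P = 0
    · subst hP0
      rw [show (((0:Nat)+1 : Nat) : Int) + 1 = 2 by norm_num,
        PySem.List.pyRange_one_eq_nil (by omega), List.foldl_nil,
        pv_s0_getD number h1 i hi]
      simp only [pvGood, decide_eq_true_eq]
      constructor
      · intro h
        exact ⟨h, fun q hq hq1 _ => absurd (hq.two_le.trans hq1) (by omega)⟩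
      · exact fun h => h.1
    · have hP1 : 1 ≤ P := by omega
      have hPn' : (P : Int) ≤ number := by push_cast at hPn ⊢; omega
      have hPn1 : ((P+1 : Nat) : Int) ≤ number := hPn
      have hsplit : PySem.List.pyRange 2 (((P+1 : Nat) : Int) + 1) 1
          = PySem.List.pyRange 2 ((P : Int) + 1) 1 ++ [((P : Int) + 1)] := by
        push_cast
        exact PySem.List.pyRange_one_succ_right (by omega)
      rw [hsplit, List.foldl_append, List.foldl_cons, List.foldl_nil]
      have IH := ih hP1 hPn'
      set a := (PySem.List.pyRange 2 ((P : Int) + 1) 1).foldl (pvSieveStep number)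
          ([false, false] ++ List.replicate (number - 1).toNat true) with ha
      have hIHp : a.getD (P+1) false = true ↔ pvGood P (P+1) := by
        have := IH (P+1) (by exact_mod_cast hPn1)
        rwa [ha]
      unfold pvSieveStep
      rw [show ((P : Int) + 1).toNat = P + 1 from by omega]
      by_cases hg : a.getD (P+1) false = true
      · -- sieve[p] is True: p = P+1 is prime and its multiples ≥ p*p get marked
        have hgood : pvGood P (P+1) := hIHp.mp hg
        have hprime : Nat.Prime (P+1) := by
          by_contra hnp
          have hq := Nat.minFac_prime (show P+1 ≠ 1 by omega)
          have hqd := Nat.minFac_dvd (P+1)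
          have hqs : (P+1).minFac * (P+1).minFac ≤ P+1 := by
            have := Nat.minFac_sq_le_self (show 0 < P+1 by omega) hnp
            rwa [pow_two] at this
          have hq2 : 2 ≤ (P+1).minFac := hq.two_le
          have hqP : (P+1).minFac ≤ P := by
            have hqle : (P+1).minFac ≤ P+1 := Nat.le_of_dvd (by omega) hqd
            rcases Nat.lt_or_ge (P+1).minFac (P+1) with h | h
            · omega
            · have hqe : (P+1).minFac = P+1 := by omega
              rw [hqe] at hqs; nlinarith
          exact hgood.2 _ hq hqP hqd hqs
        rw [if_pos hg]
        unfold pvMark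
        have hstep : (0:Int) < (P : Int) + 1 := by omega
        have hnn : ∀ m ∈ PySem.List.pyRange (((P:Int)+1) * ((P:Int)+1)) (number+1) ((P:Int)+1), 0 ≤ m := by
          intro m hm
          have := ((PySem.List.mem_pyRange_iff_of_pos hstep m).mp hm).1
          nlinarith
        rw [pv_foldl_set_false _ hnn a i]
        have hmem : ((i : Int) ∈ PySem.List.pyRange (((P:Int)+1) * ((P:Int)+1)) (number+1) ((P:Int)+1))
            ↔ ((P+1) * (P+1) ≤ i ∧ (P+1) ∣ i) := by
          rw [PySem.List.mem_pyRange_iff_of_pos hstep]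
          constructor
          · rintro ⟨hlo, _, hdv⟩
            have hdv2 : ((P:Int)+1) ∣ (i : Int) := by
              have hpp : ((P:Int)+1) ∣ ((P:Int)+1) * ((P:Int)+1) := dvd_mul_right _ _
              have := dvd_add hdv hpp
              simpa using this
            constructor
            · exact_mod_cast hlo
            · have : ((P+1:Nat) : Int) ∣ (i : Int) := by exact_mod_cast hdv2
              exact_mod_cast this
          · rintro ⟨hlo, hdv⟩
            refine ⟨by exact_mod_cast hlo, by omega, ?_⟩
            have hdv2 : ((P:Int)+1) ∣ (i : Int) := by exact_mod_cast Int.natCast_dvd_natCast.mpr hdv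
            have hpp : ((P:Int)+1) ∣ ((P:Int)+1) * ((P:Int)+1) := dvd_mul_right _ _
            exact dvd_sub hdv2 hpp
        by_cases hm : (P+1) * (P+1) ≤ i ∧ (P+1) ∣ i
        · rw [if_pos (hmem.mpr hm)]
          simp only [Bool.false_eq_true, false_iff]
          intro hgood'
          exact hgood'.2 _ hprime (le_refl _) hm.2 hm.1
        · rw [if_neg (fun hc => hm (hmem.mp hc))]
          rw [IH i hi]
          unfold pvGood
          constructor
          · rintro ⟨h2, hall⟩
            refine ⟨h2, fun q hq hqle hqd hqs => ?_⟩
            rcases Nat.lt_or_ge q (P+1) with h | h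
            · exact hall q hq (by omega) hqd hqs
            · have hqe : q = P+1 := by omega
              subst hqe
              exact hm ⟨hqs, hqd⟩
          · rintro ⟨h2, hall⟩
            exact ⟨h2, fun q hq hqle hqd hqs => hall q hq (by omega) hqd hqs⟩
      · -- sieve[p] is False: p = P+1 is composite, marking is skipped and nothing changes
        rw [if_neg hg]
        have hnotgood : ¬ pvGood P (P+1) := fun h => hg (hIHp.mpr h)
        have hnp : ¬ Nat.Prime (P+1) := by
          intro hp
          apply hnotgood
          refine ⟨by omega, fun q hq hqle hqd hqs => ?_⟩
          rcases (hp.eq_one_or_self_of_dvd q hqd) with h | h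
          · exact absurd h (by have := hq.two_le; omega)
          · omega
        rw [IH i hi]
        unfold pvGood
        constructor
        · rintro ⟨h2, hall⟩
          refine ⟨h2, fun q hq hqle hqd hqs => ?_⟩
          rcases Nat.lt_or_ge q (P+1) with h | h
          · exact hall q hq (by omega) hqd hqs
          · have hqe : q = P+1 := by omega
            subst hqe
            exact absurd hq hnp
        · rintro ⟨h2, hall⟩
          exact ⟨h2, fun q hq hqle hqd hqs => hall q hq (by omega) hqd hqs⟩

-- final sieve = primality
theorem pv_sieve_prime (number : Int) (h1 : 1 ≤ number) (i : Nat) (hi : (i : Int) ≤ number) :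
    (pvSieve number).getD i false = decide (Nat.Prime i) := by
  have hs1 : 1 ≤ Nat.sqrt number.toNat := by
    rcases Nat.eq_zero_or_pos (Nat.sqrt number.toNat) with h | h
    · rw [Nat.sqrt_eq_zero] at h; omega
    · omega
  have hsn : ((Nat.sqrt number.toNat : Nat) : Int) ≤ number := by
    have := Nat.sqrt_le_self number.toNat
    omega
  have hinv := pv_sieve_inv number h1 (Nat.sqrt number.toNat) hs1 hsn i hi
  have hiff : pvGood (Nat.sqrt number.toNat) i ↔ Nat.Prime i := by
    constructor
    · rintro ⟨h2, hall⟩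
      by_contra hnp
      have hq := Nat.minFac_prime (show i ≠ 1 by omega)
      have hqd := Nat.minFac_dvd i
      have hqs : i.minFac * i.minFac ≤ i := by
        have := Nat.minFac_sq_le_self (by omega) hnp
        rwa [pow_two] at this
      have hqsqrt : i.minFac ≤ Nat.sqrt number.toNat := Nat.le_sqrt.mpr (le_trans hqs (by omega))
      exact hall _ hq hqsqrt hqd hqs
    · intro hp
      refine ⟨hp.two_le, fun q hq hqle hqd hqs => ?_⟩
      rcases hp.eq_one_or_self_of_dvd q hqd with h | h
      · exact absurd h (by have := hq.two_le; omega)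
      · subst h; nlinarith [hp.two_le]
  have hkey : (pvSieve number).getD i false = true ↔ Nat.Prime i := by
    unfold pvSieve
    rw [hinv] at *
    exact hiff
  cases h : (pvSieve number).getD i false
  · symm
    rw [decide_eq_false_iff_not]
    intro hp
    have := hkey.mpr hp
    rw [h] at this
    cases this
  · symm
    rw [decide_eq_true_eq]
    exact hkey.mp h

-- A's trial division over range(3, isqrt(n)+1, 2) = primality, for n ≥ 1
theorem pv_isPrime_eq (n : Int) (h1 : 1 ≤ n) : pvIsPrime n = decide (Nat.Prime n.toNat) := by
  unfold pvIsPrime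
  by_cases h2 : n = 2
  · subst h2; decide
  · rw [if_neg (by simpa using h2)]
    by_cases he : PySem.Int.mod n 2 = 0
    · have hdvd : (2:Int) ∣ n := (PySem.Int.mod_eq_zero_iff_dvd n 2).mp he
      have hnp : ¬ Nat.Prime n.toNat := by
        intro hp
        have hd2 : (2:Nat) ∣ n.toNat := by omega
        rcases hp.eq_one_or_self_of_dvd 2 hd2 with h | h <;> omega
      rw [if_pos (by simp; exact Or.inl hdvd)]
      simp [hnp]
    · by_cases hle : n ≤ 1
      · have hne : n = 1 := by omega
        subst hne; decide
      · have h3 : 3 ≤ n := by omega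
        have hodd : ¬ (2:Int) ∣ n := fun hd => he ((PySem.Int.mod_eq_zero_iff_dvd n 2).mpr hd)
        rw [if_neg (by simp [hle]; omega)]
        have hNn : ((n.toNat : Nat) : Int) = n := Int.toNat_of_nonneg (by omega)
        have hiff : ((PySem.List.pyRange 3 ((Nat.sqrt n.toNat : Int) + 1) 2).all
            (fun d => !(PySem.Int.mod n d == 0)) = true) ↔ Nat.Prime n.toNat := by
          rw [List.all_eq_true]
          have hmem : ∀ d : Int, d ∈ PySem.List.pyRange 3 ((Nat.sqrt n.toNat : Int) + 1) 2
              ↔ (3 ≤ d ∧ d < (Nat.sqrt n.toNat : Int) + 1 ∧ (2:Int) ∣ d - 3) := by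
            intro d
            rw [PySem.List.mem_pyRange_iff_of_pos (by norm_num)]
          constructor
          · intro hall
            rw [Nat.prime_def_le_sqrt]
            refine ⟨by omega, fun m hm2 hms hmd => ?_⟩
            by_cases hm2d : 2 ∣ m
            · apply hodd
              have h2n : (2:Nat) ∣ n.toNat := dvd_trans hm2d hmd
              omega
            · have hm3 : 3 ≤ m := by omega
              have hdm : (m:Int) ∈ PySem.List.pyRange 3 ((Nat.sqrt n.toNat : Int) + 1) 2 := by
                refine (hmem m).mpr ⟨by exact_mod_cast hm3, by push_cast; omega, by omega⟩
              have hb := hall _ hdm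
              simp only [Bool.not_eq_eq_eq_not, Bool.not_true, beq_eq_false_iff_ne, ne_eq] at hb
              apply hb
              rw [PySem.Int.mod_eq_zero_iff_dvd]
              rw [← hNn]
              exact_mod_cast Int.natCast_dvd_natCast.mpr hmd
          · intro hp d hd
            obtain ⟨hd3, hdlt, _⟩ := (hmem d).mp hd
            simp only [Bool.not_eq_eq_eq_not, Bool.not_true, beq_eq_false_iff_ne, ne_eq]
            intro h0
            have hdn : d ∣ n := (PySem.Int.mod_eq_zero_iff_dvd n d).mp h0
            have hdnat : d.toNat ∣ n.toNat := by
              have hc : (d.toNat : Int) ∣ (n.toNat : Int) := by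
                rw [Int.toNat_of_nonneg (by omega : (0:Int) ≤ d), hNn]
                exact hdn
              exact_mod_cast hc
            rcases hp.eq_one_or_self_of_dvd _ hdnat with h | h
            · omega
            · have hlt : Nat.sqrt n.toNat < n.toNat := Nat.sqrt_lt_self (by omega)
              omega
        cases hall : (PySem.List.pyRange 3 ((Nat.sqrt n.toNat : Int) + 1) 2).all
            (fun d => !(PySem.Int.mod n d == 0))
        · symm
          rw [decide_eq_false_iff_not]
          intro hp
          have := hiff.mpr hp
          rw [hall] at this
          cases this
        · symm
          rw [decide_eq_true_eq]
          exact hiff.mp hall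

-- the signed accumulation loop in closed form
theorem pv_foldl_signed (L : List Int) (p : Int → Bool) (c : Int) :
    L.foldl (fun s n => if p n then s + n else s - n) c
      = c + 2 * (L.filter p).sum - L.sum := by
  induction L generalizing c with
  | nil => simp
  | cons x t ih =>
    simp only [List.foldl_cons, List.filter_cons]
    cases hx : p x <;> simp [ih, List.sum_cons] <;> ring

-- sum of 1..u
theorem pv_range_sum (u : Int) (h : 0 ≤ u) :
    2 * (PySem.List.pyRange 1 (u + 1) 1).sum = u * (u + 1) := by
  have key : ∀ k : Nat, 2 * (PySem.List.pyRange 1 ((k : Int) + 1) 1).sum = (k : Int) * ((k : Int) + 1) := by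
    intro k
    induction k with
    | zero => simp
    | succ k ih =>
      have h1 : (1 : Int) ≤ (k : Int) + 1 := by omega
      have hc : ((k + 1 : Nat) : Int) + 1 = ((k : Int) + 1) + 1 := by push_cast; ring
      rw [hc, PySem.List.pyRange_one_succ_right h1, List.sum_append]
      push_cast
      simp only [List.sum_cons, List.sum_nil]
      nlinarith [ih]
  have hk := key u.toNat
  rwa [Int.toNat_of_nonneg h] at hk

-- ===== VERDICT (by name: the statement is the Claim_ definition above) =====
theorem difference_of_primes_and_non_primes_through_n_spec : Claim_equal_difference_of_primes_and_non_primes_through_n := by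
  intro number _
  unfold Spec_difference_of_primes_and_non_primes_through_n
  unfold difference_of_primes_and_non_primes_through_n difference_of_primes_and_non_primes_through_n_alt
  by_cases hn : number < 1
  · rw [PySem.List.pyRange_one_eq_nil (by omega), List.foldl_nil, if_pos hn]
  · have h1 : (1:Int) ≤ number := by omega
    rw [if_neg hn]
    have hcongr : ∀ (acc : Int), ∀ x ∈ PySem.List.pyRange 1 (number+1) 1,
        (if pvIsPrime x then acc + x else acc - x)
          = (if decide (Nat.Prime x.toNat) then acc + x else acc - x) := by
      intro acc x hx
      have hx1 : (1:Int) ≤ x := (PySem.List.mem_pyRange_one.mp hx).1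
      rw [pv_isPrime_eq x hx1]
    rw [PySem.List.foldl_congr_mem _ _ _ _ hcongr, pv_foldl_signed]
    have hfilter : (PySem.List.pyRange 1 (number+1) 1).filter (fun m => decide (Nat.Prime m.toNat))
        = (PySem.List.pyRange 2 (number+1) 1).filter (fun i => (pvSieve number).getD i.toNat false) := by
      rw [PySem.List.pyRange_one_cons (show (1:Int) < number + 1 by omega), List.filter_cons]
      simp only [show (decide (Nat.Prime ((1:Int)).toNat)) = false from by decide,
        Bool.false_eq_true, if_false]
      apply List.filter_congr
      intro x hx
      obtain ⟨hx2, hxlt⟩ := PySem.List.mem_pyRange_one.mp hx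
      exact (pv_sieve_prime number h1 x.toNat (by omega)).symm
    have hsum : (PySem.List.pyRange 1 (number+1) 1).sum = PySem.Int.floordiv (number * (number + 1)) 2 := by
      have h2 := pv_range_sum number (by omega)
      rw [eq_comm, PySem.Int.floordiv_eq_iff_of_pos (by norm_num)]
      constructor <;> nlinarith
    rw [hfilter, hsum]
    ring
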